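-- pv_equiv track=rewrite | github.com/Niteshkrjhag/POTD-Problem-of-the-Day-LeetCode-GFG- | GFG/Elements_in_range _a_to_b.py | cntInRange
-- ===== SOURCE A (Python) =====
-- import bisect
--
-- def cntInRange(arr, queries):
--     arr.sort()
--     result = []
--
--     for a, b in queries:
--         left = bisect.bisect_left(arr, a)
--         right = bisect.bisect_right(arr, b)
--         result.append(right - left)
--
--     return result
-- ===== SOURCE B (Python) =====
-- def cntInRange(arr, queries):
--     # Rank-difference by linear counting: no binary search, no bisect import.
--     # arr.sort() kept to preserve A's observable in-place mutation.
--     arr.sort()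
--     result = []
--     for a, b in queries:
--         le_b = sum(1 for x in arr if x <= b)
--         lt_a = sum(1 for x in arr if x < a)
--         result.append(le_b - lt_a)
--     return result
-- ===== Notes on version B (the rewrite author's own statement) =====
-- stated objective: simpler
-- what changed: Replaces the two binary searches (bisect_left/bisect_right) per query with plain linear counting of elements <= b and elements < a, dropping the bisect import; the in-place sort is kept only for the mutation side effect.
import Mathlib
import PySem

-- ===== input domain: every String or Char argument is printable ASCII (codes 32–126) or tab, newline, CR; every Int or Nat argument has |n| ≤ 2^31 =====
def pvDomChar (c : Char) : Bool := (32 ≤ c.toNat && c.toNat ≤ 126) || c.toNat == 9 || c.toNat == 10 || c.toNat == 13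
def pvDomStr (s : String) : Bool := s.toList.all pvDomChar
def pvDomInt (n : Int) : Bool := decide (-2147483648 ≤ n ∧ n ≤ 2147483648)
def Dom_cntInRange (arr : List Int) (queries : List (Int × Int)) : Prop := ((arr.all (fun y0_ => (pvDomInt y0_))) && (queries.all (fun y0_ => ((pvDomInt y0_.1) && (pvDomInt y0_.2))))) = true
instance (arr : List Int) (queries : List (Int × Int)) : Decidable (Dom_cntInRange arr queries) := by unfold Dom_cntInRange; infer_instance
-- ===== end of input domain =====

-- B replaces the per-query binary searches with linear counting (simpler, no bisect);
-- both Pythons sort arr in place, and the equivalence proved here is about the return value.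

-- ===== PORT A =====
def cntInRange (arr : List Int) (queries : List (Int × Int)) : List Int :=
  let sortedArr := PySem.List.sorted arr (fun x => x)   -- arr.sort()
  queries.foldl (fun result q =>
    let left := PySem.List.bisectLeft sortedArr q.1
    let right := PySem.List.bisectRight sortedArr q.2
    result ++ [(right : Int) - (left : Int)]) []

-- ===== PORT B =====
def cntInRange_alt (arr : List Int) (queries : List (Int × Int)) : List Int :=
  let s := PySem.List.sorted arr (fun x => x)           -- arr.sort()
  queries.foldl (fun result q =>
    let leB := s.foldl (fun acc x => if x ≤ q.2 then acc + 1 else acc) (0 : Int)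
    let ltA := s.foldl (fun acc x => if x < q.1 then acc + 1 else acc) (0 : Int)
    result ++ [leB - ltA]) []

-- ===== PRECONDITION & SPEC =====
def Spec_cntInRange (arr : List Int) (queries : List (Int × Int)) (out : List Int) : Prop := out = cntInRange_alt arr queries
instance (arr : List Int) (queries : List (Int × Int)) (out : List Int) : Decidable (Spec_cntInRange arr queries out) := by unfold Spec_cntInRange; infer_instance

-- ===== CLAIM (what is proved, stated in full; the proofs are below) =====
def Claim_equal_cntInRange : Prop := ∀ (arr : List Int) (queries : List (Int × Int)), Dom_cntInRange arr queries → Spec_cntInRange arr queries (cntInRange arr queries)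

-- ===== LEMMAS AND PROOFS =====

-- A list whose true values of p occupy exactly the first k positions has countP p = k.
theorem countP_eq_of_prefix (s : List Int) (p : Int → Bool) (k : Nat) (hk : k ≤ s.length)
    (h1 : ∀ j (hj : j < s.length), j < k → p s[j])
    (h2 : ∀ j (hj : j < s.length), k ≤ j → ¬ p s[j] = true) :
    s.countP p = k := by
  induction s generalizing k with
  | nil => simp_all
  | cons y t ih =>
    cases k with
    | zero =>
      have hz : ∀ x ∈ y :: t, ¬ p x = true := by
        intro x hx
        obtain ⟨j, hj, rfl⟩ := List.mem_iff_getElem.mp hx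
        exact h2 j hj (Nat.zero_le _)
      simp [List.countP_eq_zero.mpr hz]
    | succ k' =>
      have hy : p y = true := h1 0 (by simp) (Nat.succ_pos _)
      have ht : t.countP p = k' := by
        apply ih
        · simpa using hk
        · intro j hj hjk
          have := h1 (j+1) (by simpa using Nat.succ_lt_succ hj) (Nat.succ_lt_succ hjk)
          simpa using this
        · intro j hj hjk
          have := h2 (j+1) (by simpa using Nat.succ_lt_succ hj) (Nat.succ_le_succ hjk)
          simpa using this
      simp [hy, ht]

theorem bisectLeft_eq_countP (s : List Int) (x : Int)
    (hs : List.Pairwise (fun a b => a ≤ b) s) :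
    PySem.List.bisectLeft s x = s.countP (fun y => decide (y < x)) := by
  obtain ⟨hle, h1, h2⟩ := PySem.List.bisectLeft_spec s x hs
  refine (countP_eq_of_prefix s _ _ hle ?_ ?_).symm
  · intro j hj hjk; simpa using h1 j hj hjk
  · intro j hj hjk; simpa using not_lt.mpr (h2 j hj hjk)

theorem bisectRight_eq_countP (s : List Int) (x : Int)
    (hs : List.Pairwise (fun a b => a ≤ b) s) :
    PySem.List.bisectRight s x = s.countP (fun y => decide (y ≤ x)) := by
  obtain ⟨hle, h1, h2⟩ := PySem.List.bisectRight_spec s x hs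
  refine (countP_eq_of_prefix s _ _ hle ?_ ?_).symm
  · intro j hj hjk; simpa using h1 j hj hjk
  · intro j hj hjk; simpa using not_le.mpr (h2 j hj hjk)

theorem foldl_count (s : List Int) (p : Int → Prop) [DecidablePred p] (c : Int) :
    s.foldl (fun acc x => if p x then acc + 1 else acc) c = c + s.countP (fun x => decide (p x)) := by
  induction s generalizing c with
  | nil => simp
  | cons y t ih =>
    by_cases h : p y <;> simp [h, ih] <;> ring

theorem per_query (s : List Int) (hs : List.Pairwise (fun a b => a ≤ b) s) (a b : Int) :
    ((PySem.List.bisectRight s b : Int) - (PySem.List.bisectLeft s a : Int)) =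
      s.foldl (fun acc x => if x ≤ b then acc + 1 else acc) (0 : Int) -
      s.foldl (fun acc x => if x < a then acc + 1 else acc) (0 : Int) := by
  rw [bisectLeft_eq_countP s a hs, bisectRight_eq_countP s b hs,
    foldl_count s (fun x => x ≤ b) 0, foldl_count s (fun x => x < a) 0]
  simp

theorem foldl_queries (s : List Int) (hs : List.Pairwise (fun a b => a ≤ b) s)
    (queries : List (Int × Int)) (acc : List Int) :
    queries.foldl (fun result q =>
      result ++ [((PySem.List.bisectRight s q.2 : Int) - (PySem.List.bisectLeft s q.1 : Int))]) acc =
    queries.foldl (fun result q =>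
      result ++ [s.foldl (fun acc x => if x ≤ q.2 then acc + 1 else acc) (0 : Int) -
                 s.foldl (fun acc x => if x < q.1 then acc + 1 else acc) (0 : Int)]) acc := by
  induction queries generalizing acc with
  | nil => rfl
  | cons q t ih =>
    simp only [List.foldl_cons]
    rw [per_query s hs q.1 q.2]
    exact ih _

-- ===== VERDICT (by name: the statement is the Claim_ definition above) =====
theorem cntInRange_spec : Claim_equal_cntInRange := by
  intro arr queries _
  unfold Spec_cntInRange cntInRange cntInRange_alt
  exact foldl_queries _ (PySem.List.sorted_pairwise arr (fun x => x)) queries []
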